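-- pv_equiv track=rewrite | github.com/TrueV1sion/ai-roadtrip-storyteller | backend/app/services/local_expert_agent.py | _parse_hidden_gems
-- ===== SOURCE A (Python) =====
-- from typing import Dict, List, Any, Optional
--
-- def _parse_hidden_gems(response: str) -> List[Dict[str, Any]]:
--     """Parse hidden gems from response text"""
--     # Simplified parsing - in production would use more sophisticated NLP
--     gems = []
--     lines = response.split('\n')
--     current_gem = {}
--
--     for line in lines:
--         if any(marker in line.lower() for marker in ['most people don\'t know', 'locals call it', 'favorite spot']):
--             if current_gem:
--                 gems.append(current_gem)
--             current_gem = {'description': line}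
--         elif current_gem:
--             current_gem['details'] = current_gem.get('details', '') + ' ' + line
--
--     if current_gem:
--         gems.append(current_gem)
--
--     return gems[:4]  # Return top 4
-- ===== SOURCE B (Python) =====
-- def _parse_hidden_gems(response):
--     """Parse hidden gems by locating marker lines and slicing the text into segments."""
--     markers = ["most people don't know", 'locals call it', 'favorite spot']
--
--     def is_marker(line):
--         low = line.lower()
--         return any(m in low for m in markers)
--
--     def parse(lines):
--         # lines: the remaining lines, nothing accumulated
--         if not lines:
--             return []
--         head, rest = lines[0], lines[1:]
--         if not is_marker(head):
--             return parse(rest)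
--         i = 0
--         while i < len(rest) and not is_marker(rest[i]):
--             i += 1
--         gem = {'description': head}
--         if i:
--             gem['details'] = ' ' + ' '.join(rest[:i])
--         return [gem] + parse(rest[i:])
--
--     return parse(response.split('\n'))[:4]
-- ===== Notes on version B (the rewrite author's own statement) =====
-- stated objective: alternative
-- what changed: Replaced A's single fold carrying a mutable current-gem dict with a recursive segmenter: find a marker line, count the non-marker lines after it, build the gem from that slice in one step, and recurse on the remainder.
import Mathlib
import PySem

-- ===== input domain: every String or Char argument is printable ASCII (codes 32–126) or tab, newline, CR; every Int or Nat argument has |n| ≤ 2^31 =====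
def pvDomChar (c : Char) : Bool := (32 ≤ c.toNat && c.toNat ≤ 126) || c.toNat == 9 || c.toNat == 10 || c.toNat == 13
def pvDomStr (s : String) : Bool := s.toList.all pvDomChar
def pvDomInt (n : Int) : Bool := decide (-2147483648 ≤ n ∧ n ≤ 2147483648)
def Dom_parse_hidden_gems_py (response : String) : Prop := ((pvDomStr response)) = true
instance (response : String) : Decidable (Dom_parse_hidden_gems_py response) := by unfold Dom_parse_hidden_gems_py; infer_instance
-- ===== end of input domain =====

-- B replaces A's fold carrying a mutable current-gem dict by a recursive segmenter that
-- builds each gem from the slice of lines following its marker in one step (objective: alternative).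

-- ===== PORT A =====
def pvMarkers : List String := ["most people don't know", "locals call it", "favorite spot"]

def pvIsMarker (line : String) : Bool :=
  pvMarkers.any (fun m => PySem.Str.isIn m (PySem.Str.lower line))

def pvStepA (st : List (List (String × String)) × PySem.Dict String String) (line : String) :
    List (List (String × String)) × PySem.Dict String String :=
  if pvIsMarker line then
    ((if st.2.items.isEmpty then st.1 else st.1 ++ [st.2.items]),
     PySem.Dict.ofList [("description", line)])
  else if st.2.items.isEmpty then st
  else (st.1, st.2.insert "details" (st.2.getD "details" "" ++ " " ++ line))

def parse_hidden_gems_py (response : String) : List (List (String × String)) :=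
  let lines := (PySem.Str.split? response "\n").getD []   -- sep "\n" ≠ "": split? is always `some`
  let st := lines.foldl pvStepA ([], PySem.Dict.ofList [])
  let gems := if st.2.items.isEmpty then st.1 else st.1 ++ [st.2.items]
  PySem.List.slice gems none (some 4)

-- ===== PORT B =====
-- the `while i < len(rest) and not is_marker(rest[i]): i += 1` loop of Source B
def pvCountNon : List String → Nat
  | [] => 0
  | l :: ls => if pvIsMarker l then 0 else pvCountNon ls + 1

def pvParseB : List String → List (List (String × String))
  | [] => []
  | head :: rest =>
    if !pvIsMarker head then pvParseB rest
    else
      let i := pvCountNon rest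
      let gem := if i = 0 then [("description", head)]
                 else [("description", head), ("details", " " ++ PySem.Str.join " " (rest.take i))]
      gem :: pvParseB (rest.drop i)
termination_by ls => ls.length
decreasing_by all_goals (simp [List.length_drop]; try omega)

def parse_hidden_gems_py_alt (response : String) : List (List (String × String)) :=
  PySem.List.slice (pvParseB ((PySem.Str.split? response "\n").getD [])) none (some 4)

-- ===== PRECONDITION & SPEC =====
def Spec_parse_hidden_gems_py (response : String) (out : List (List (String × String))) : Prop := out = parse_hidden_gems_py_alt response
instance (response : String) (out : List (List (String × String))) : Decidable (Spec_parse_hidden_gems_py response out) := by unfold Spec_parse_hidden_gems_py; infer_instance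

-- ===== CLAIM (what is proved, stated in full; the proofs are below) =====
def Claim_equal_parse_hidden_gems_py : Prop := ∀ (response : String), Dom_parse_hidden_gems_py response → Spec_parse_hidden_gems_py response (parse_hidden_gems_py response)

-- ===== LEMMAS AND PROOFS =====

-- A's final `if current_gem: gems.append(current_gem)`
def pvFlush (st : List (List (String × String)) × PySem.Dict String String) :
    List (List (String × String)) :=
  if st.2.items.isEmpty then st.1 else st.1 ++ [st.2.items]

-- A's detail accumulation over a block of non-marker lines
def pvExtend (c : PySem.Dict String String) (t : List String) : PySem.Dict String String :=
  t.foldl (fun c l => c.insert "details" (c.getD "details" "" ++ " " ++ l)) c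

-- the detail STRING accumulation
def pvAcc (d : String) (t : List String) : String := t.foldl (fun s l => s ++ " " ++ l) d

-- what A produces from a pending gem c followed by lines ls
def pvCont (c : PySem.Dict String String) (ls : List String) : List (List (String × String)) :=
  (pvExtend c (ls.take (pvCountNon ls))).items :: pvParseB (ls.drop (pvCountNon ls))

lemma pvInsert_items_ne (c : PySem.Dict String String) (k v : String) :
    (c.insert k v).items ≠ [] := by
  obtain ⟨l⟩ := c
  rcases l with _ | ⟨p, rest⟩
  · simp [PySem.Dict.insert]
  · simp only [PySem.Dict.insert]; split <;> simp

lemma pvAcc_shift (t : List String) : ∀ d : String, pvAcc d t = d ++ pvAcc "" t := by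
  induction t with
  | nil => intro d; apply String.toList_inj.mp; simp [pvAcc]
  | cons a t ih =>
    intro d
    have h1 : pvAcc d (a :: t) = pvAcc (d ++ " " ++ a) t := rfl
    have h2 : pvAcc "" (a :: t) = pvAcc (" " ++ a) t := rfl
    rw [h1, h2, ih (d ++ " " ++ a), ih (" " ++ a)]
    apply String.toList_inj.mp
    simp [String.toList_append]

lemma pvAcc_join (t : List String) : ∀ l : String,
    pvAcc "" (l :: t) = " " ++ PySem.Str.join " " (l :: t) := by
  induction t with
  | nil =>
    intro l
    apply String.toList_inj.mp
    simp [pvAcc, PySem.Str.toList_join, PySem.Chars.join_singleton, String.toList_append]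
  | cons a t ih =>
    intro l
    have h1 : pvAcc "" (l :: a :: t) = pvAcc (" " ++ l) (a :: t) := rfl
    rw [h1, pvAcc_shift, ih a]
    apply String.toList_inj.mp
    simp [String.toList_append, PySem.Str.toList_join, PySem.Chars.join_cons_cons]

lemma pvExtend_two (t : List String) : ∀ x d : String,
    pvExtend (PySem.Dict.ofList [("description", x), ("details", d)]) t
      = PySem.Dict.ofList [("description", x), ("details", pvAcc d t)] := by
  induction t with
  | nil => intro x d; rfl
  | cons a t ih =>
    intro x d
    have h : pvExtend (PySem.Dict.ofList [("description", x), ("details", d)]) (a :: t)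
        = pvExtend (PySem.Dict.ofList [("description", x), ("details", d ++ " " ++ a)]) t := rfl
    rw [h, ih]
    rfl

-- the gem A accumulates from description x and trailing block t is exactly B's gem
lemma pvGem_eq (x : String) (t : List String) :
    (pvExtend (PySem.Dict.ofList [("description", x)]) t).items
      = (if t.isEmpty then [("description", x)]
         else [("description", x), ("details", " " ++ PySem.Str.join " " t)]) := by
  rcases t with _ | ⟨a, t⟩
  · rfl
  · have h : pvExtend (PySem.Dict.ofList [("description", x)]) (a :: t)
        = pvExtend (PySem.Dict.ofList [("description", x), ("details", "" ++ " " ++ a)]) t := rfl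
    rw [h, pvExtend_two]
    have h2 : pvAcc ("" ++ " " ++ a) t = pvAcc "" (a :: t) := rfl
    rw [h2, pvAcc_join t a]
    have hit : (PySem.Dict.ofList [("description", x), ("details", " " ++ PySem.Str.join " " (a :: t))] : PySem.Dict String String).items
        = [("description", x), ("details", " " ++ PySem.Str.join " " (a :: t))] := rfl
    simp [hit]

-- pvCont of a freshly started gem is B's head segment
lemma pvCont_desc (x : String) (ls : List String) :
    pvCont (PySem.Dict.ofList [("description", x)]) ls
      = (if pvCountNon ls = 0 then [("description", x)]
         else [("description", x), ("details", " " ++ PySem.Str.join " " (ls.take (pvCountNon ls)))])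
        :: pvParseB (ls.drop (pvCountNon ls)) := by
  unfold pvCont
  rw [pvGem_eq]
  by_cases h0 : pvCountNon ls = 0
  · simp [h0]
  · have hls : ls ≠ [] := by cases ls <;> simp_all [pvCountNon]
    have hne : (ls.take (pvCountNon ls)).isEmpty = false := by
      simp [List.take_eq_nil_iff, h0, hls]
    simp [hne, h0]

-- MAIN INVARIANT: flushing A's fold from state (g, c) yields g ++ the segments B builds
lemma pvMain (ls : List String) : ∀ (g : List (List (String × String)))
    (c : PySem.Dict String String),
    pvFlush (ls.foldl pvStepA (g, c))
      = g ++ (if c.items.isEmpty then pvParseB ls else pvCont c ls) := by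
  induction ls with
  | nil =>
    intro g c
    by_cases h : c.items.isEmpty
    · simp [pvFlush, h, pvParseB]
    · simp [pvFlush, h, pvCont, pvCountNon, pvExtend, pvParseB]
  | cons l ls ih =>
    intro g c
    by_cases hm : pvIsMarker l
    · have hstep : (l :: ls).foldl pvStepA (g, c)
          = ls.foldl pvStepA
              ((if c.items.isEmpty then g else g ++ [c.items]),
               PySem.Dict.ofList [("description", l)]) := by
        simp [List.foldl_cons, pvStepA, hm]
      rw [hstep, ih]
      have hne : (PySem.Dict.ofList [("description", l)] : PySem.Dict String String).items.isEmpty = false := rfl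
      have hB : pvParseB (l :: ls)
          = (if pvCountNon ls = 0 then [("description", l)]
             else [("description", l), ("details", " " ++ PySem.Str.join " " (ls.take (pvCountNon ls)))])
            :: pvParseB (ls.drop (pvCountNon ls)) := by
        rw [pvParseB]
        simp [hm]
      by_cases hc : c.items.isEmpty
      · -- no pending gem: B also starts its segment at l
        simp only [hc, hne, Bool.false_eq_true, if_false, if_true]
        rw [pvCont_desc, hB]
      · -- pending gem c is flushed unchanged (the marker stops its block at once)
        have hcont : pvCont c (l :: ls) = c.items :: pvParseB (l :: ls) := by
          unfold pvCont
          have h0 : pvCountNon (l :: ls) = 0 := by simp [pvCountNon, hm]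
          simp [h0, pvExtend]
        simp only [hc, hne, Bool.false_eq_true, if_false]
        rw [hcont, pvCont_desc, hB]
        simp
    · -- l is not a marker
      by_cases hc : c.items.isEmpty
      · have hstep : (l :: ls).foldl pvStepA (g, c) = ls.foldl pvStepA (g, c) := by
          simp [List.foldl_cons, pvStepA, hm, hc]
        rw [hstep, ih, if_pos hc, if_pos hc]
        have : pvParseB (l :: ls) = pvParseB ls := by rw [pvParseB]; simp [hm]
        rw [this]
      · have hstep : (l :: ls).foldl pvStepA (g, c)
            = ls.foldl pvStepA (g, c.insert "details" (c.getD "details" "" ++ " " ++ l)) := by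
          simp [List.foldl_cons, pvStepA, hm, hc]
        rw [hstep, ih, if_neg hc]
        have hne : (c.insert "details" (c.getD "details" "" ++ " " ++ l)).items.isEmpty = false := by
          simp [pvInsert_items_ne]
        rw [hne]
        simp only [Bool.false_eq_true, if_false]
        congr 1
        -- pvCont c (l :: ls) = pvCont (c extended by l) ls
        unfold pvCont
        have hn : pvCountNon (l :: ls) = pvCountNon ls + 1 := by simp [pvCountNon, hm]
        rw [hn]
        have ht : (l :: ls).take (pvCountNon ls + 1) = l :: ls.take (pvCountNon ls) := rfl
        have hd : (l :: ls).drop (pvCountNon ls + 1) = ls.drop (pvCountNon ls) := rfl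
        rw [ht, hd]
        rfl

-- ===== VERDICT (by name: the statement is the Claim_ definition above) =====
theorem parse_hidden_gems_py_spec : Claim_equal_parse_hidden_gems_py := by
  intro response _
  show PySem.List.slice
      (pvFlush (((PySem.Str.split? response "\n").getD []).foldl pvStepA ([], PySem.Dict.ofList [])))
      none (some 4) = _
  rw [pvMain]
  rfl
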